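-- pv_equiv track=rewrite | github.com/imos/hokusetsu-ikimono | scripts/archive_wayback.py | build_capture_map
-- ===== SOURCE A (Python) =====
-- def build_capture_map(rows, cutoff=None):
--     if not rows:
--         return {}
--     header = rows[0]
--     try:
--         ts_index = header.index("timestamp")
--         original_index = header.index("original")
--     except ValueError:
--         raise RuntimeError("Unexpected CDX header format")
--
--     captures = {}
--     for row in rows[1:]:
--         if len(row) <= max(ts_index, original_index):
--             continue
--         timestamp = row[ts_index]
--         original = row[original_index]
--         if cutoff and timestamp >= cutoff:
--             continue
--         captures.setdefault(original, []).append(timestamp)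
--
--     for timestamps in captures.values():
--         timestamps.sort(reverse=True)
--     return captures
-- ===== SOURCE B (Python) =====
-- def build_capture_map(rows, cutoff=None):
--     if not rows:
--         return {}
--     header = rows[0]
--     try:
--         ts_index = header.index("timestamp")
--         original_index = header.index("original")
--     except ValueError:
--         raise RuntimeError("Unexpected CDX header format")
--
--     # Phase 1: collect surviving (original, timestamp) pairs in one pipeline.
--     width = max(ts_index, original_index)
--     pairs = [(row[original_index], row[ts_index])
--              for row in rows[1:] if len(row) > width]
--     if cutoff:
--         pairs = [(o, t) for (o, t) in pairs if t < cutoff]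
--
--     # Phase 2: group, keeping each group sorted descending by inserting every
--     # timestamp at its place (online insertion sort) -- no final sort pass.
--     captures = {}
--     for original, timestamp in pairs:
--         lst = captures.setdefault(original, [])
--         i = 0
--         while i < len(lst) and lst[i] >= timestamp:
--             i += 1
--         lst.insert(i, timestamp)
--     return captures
-- ===== Notes on version B (the rewrite author's own statement) =====
-- stated objective: alternative
-- what changed: B first collects the surviving (original, timestamp) pairs in one filtered pipeline and then groups them while keeping each group sorted descending by a hand-written online insertion, instead of A's append-into-dict loop followed by a per-group reverse sort pass.
import Mathlib
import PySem

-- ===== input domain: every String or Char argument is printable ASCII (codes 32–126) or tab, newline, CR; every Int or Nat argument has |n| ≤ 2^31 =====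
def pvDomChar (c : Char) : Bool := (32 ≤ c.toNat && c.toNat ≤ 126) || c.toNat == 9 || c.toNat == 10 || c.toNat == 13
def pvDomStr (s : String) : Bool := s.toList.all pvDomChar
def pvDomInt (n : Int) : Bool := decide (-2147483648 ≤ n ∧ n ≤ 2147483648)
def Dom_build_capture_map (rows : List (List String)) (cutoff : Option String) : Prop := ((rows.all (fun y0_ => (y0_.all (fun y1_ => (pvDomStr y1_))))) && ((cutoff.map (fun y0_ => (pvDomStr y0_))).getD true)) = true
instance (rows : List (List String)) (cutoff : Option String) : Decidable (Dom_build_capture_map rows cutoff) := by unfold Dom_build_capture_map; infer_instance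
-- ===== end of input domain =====

-- B replaces A's append-then-sort-each-group with a filtered pair pipeline and an
-- online descending insertion per group (no final per-group sort pass); same return value.

-- ===== PORT A =====
def build_capture_map (rows : List (List String)) (cutoff : Option String) : List (String × List String) :=
  match rows with
  | [] => []
  | header :: rest =>
    match PySem.List.index? header "timestamp", PySem.List.index? header "original" with
    | some ts_index, some original_index =>
      let captures : PySem.Dict String (List String) := rest.foldl (fun d row =>
        if row.length ≤ max ts_index original_index then d
        else
          if (match cutoff with
              | none => false
              | some c => !(c == "") && decide (c ≤ PySem.List.pyGetD row (ts_index : Int) "")) then d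
          else PySem.Dict.modify d (PySem.List.pyGetD row (original_index : Int) "") []
                 (fun l => l ++ [PySem.List.pyGetD row (ts_index : Int) ""])) PySem.Dict.empty
      captures.items.map (fun p => (p.1, PySem.List.sorted p.2 (fun x => x) true))
    | _, _ => []  -- Python raises RuntimeError here; excluded by Pre_

-- ===== PORT B =====
-- port of Source B's hand-written descending insertion (scan while lst[i] >= timestamp, insert there)
def insertDescB (ts : String) : List String → List String
  | [] => [ts]
  | x :: rest => if ts ≤ x then x :: insertDescB ts rest else ts :: x :: rest

def build_capture_map_alt (rows : List (List String)) (cutoff : Option String) : List (String × List String) :=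
  match rows with
  | [] => []
  | header :: rest =>
    match PySem.List.index? header "timestamp" with
    | none => []  -- Python raises RuntimeError here; excluded by Pre_
    | some ts_index =>
    match PySem.List.index? header "original" with
    | none => []  -- Python raises RuntimeError here; excluded by Pre_
    | some original_index =>
      let pairs1 := (rest.filter (fun row => decide (max ts_index original_index < row.length))).map
        (fun row => (PySem.List.pyGetD row (original_index : Int) "", PySem.List.pyGetD row (ts_index : Int) ""))
      let pairs := match cutoff with
        | none => pairs1
        | some c => if c == "" then pairs1 else pairs1.filter (fun p => decide (p.2 < c))
      let captures : PySem.Dict String (List String) :=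
        pairs.foldl (fun d p => PySem.Dict.modify d p.1 [] (fun l => insertDescB p.2 l)) PySem.Dict.empty
      captures.items

-- ===== PRECONDITION & SPEC =====
-- Pre_ excludes exactly the inputs where A (and B) raise RuntimeError: a nonempty rows
-- whose header lacks "timestamp" or "original".
def Pre_build_capture_map (rows : List (List String)) (cutoff : Option String) : Prop :=
  ∀ h ∈ rows.take 1, "timestamp" ∈ h ∧ "original" ∈ h
instance (rows : List (List String)) (cutoff : Option String) : Decidable (Pre_build_capture_map rows cutoff) := by unfold Pre_build_capture_map; infer_instance

def pvWitness_build_capture_map : List (List String) × Option String :=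
  ([["timestamp", "original"], ["20210101000000", "http://example.com/"], ["20200101000000", "http://example.com/"]], some "20210601000000")

def Spec_build_capture_map (rows : List (List String)) (cutoff : Option String) (out : List (String × List String)) : Prop := out = build_capture_map_alt rows cutoff
instance (rows : List (List String)) (cutoff : Option String) (out : List (String × List String)) : Decidable (Spec_build_capture_map rows cutoff out) := by unfold Spec_build_capture_map; infer_instance

-- ===== CLAIM (what is proved, stated in full; the proofs are below) =====
def Claim_equal_build_capture_map : Prop := ∀ (rows : List (List String)) (cutoff : Option String), Dom_build_capture_map rows cutoff → Pre_build_capture_map rows cutoff → Spec_build_capture_map rows cutoff (build_capture_map rows cutoff)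

-- ===== LEMMAS AND PROOFS =====

-- B's scan-insert is PySem's insertBy with the descending-order predicate.
lemma insertDescB_eq_insertBy (ts : String) (l : List String) :
    insertDescB ts l = PySem.List.insertBy (fun a b => decide (b < a)) ts l := by
  induction l with
  | nil => rfl
  | cons x rest ih =>
    by_cases h : ts ≤ x
    · rw [insertDescB, if_pos h, PySem.List.insertBy, if_neg (by simp [not_lt.mpr h]), ih]
    · rw [insertDescB, if_neg h, PySem.List.insertBy, if_pos (by simp [not_le.mp h])]

-- appending one element then re-sorting descending = one descending insertion
lemma sortedDesc_append (v : List String) (ts : String) :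
    PySem.List.sorted (v ++ [ts]) (fun x => x) true
      = insertDescB ts (PySem.List.sorted v (fun x => x) true) := by
  rw [PySem.List.sorted_rev_eq_foldl_insertBy, PySem.List.sorted_rev_eq_foldl_insertBy,
      List.foldl_append, insertDescB_eq_insertBy]
  rfl

-- the value-sorting map F preserves find? (keys untouched)
lemma find?_map_sortF (l : List (String × List String)) (k : String) :
    List.find? (fun p => p.1 == k) (l.map (fun p => (p.1, PySem.List.sorted p.2 (fun x => x) true)))
      = (List.find? (fun p => p.1 == k) l).map (fun p => (p.1, PySem.List.sorted p.2 (fun x => x) true)) := by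
  induction l with
  | nil => rfl
  | cons p rest ih =>
    by_cases h : p.1 == k
    · simp [List.find?, h]
    · simp only [List.map, List.find?, h]
      simpa [h] using ih

lemma any_map_sortF (l : List (String × List String)) (k : String) :
    (l.map (fun p => (p.1, PySem.List.sorted p.2 (fun x => x) true))).any (fun p => p.1 == k)
      = l.any (fun p => p.1 == k) := by
  induction l with
  | nil => rfl
  | cons p rest ih => simp [List.any, ih]

lemma update_map_sortF (l : List (String × List String)) (k : String) (vA : List String) :
    (l.map (fun p => (p.1, PySem.List.sorted p.2 (fun x => x) true))).map
        (fun p => if p.1 == k then (k, PySem.List.sorted vA (fun x => x) true) else p)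
      = (l.map (fun p => if p.1 == k then (k, vA) else p)).map
        (fun p => (p.1, PySem.List.sorted p.2 (fun x => x) true)) := by
  rw [List.map_map, List.map_map]
  apply List.map_congr_left
  intro p _
  by_cases h : p.1 == k
  · simp [Function.comp, eq_of_beq h]
  · simp [Function.comp, h]

-- pushing the value-sorting map through one setdefault/append step turns it into one insertion step
lemma map_modify (d : PySem.Dict String (List String)) (k ts : String) :
    PySem.Dict.mk ((PySem.Dict.modify d k [] (fun l => l ++ [ts])).items.map
        (fun p => (p.1, PySem.List.sorted p.2 (fun x => x) true)))
      = PySem.Dict.modify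
          (PySem.Dict.mk (d.items.map (fun p => (p.1, PySem.List.sorted p.2 (fun x => x) true))))
          k [] (fun l => insertDescB ts l) := by
  have hfind := find?_map_sortF d.items k
  unfold PySem.Dict.modify PySem.Dict.insert PySem.Dict.contains PySem.Dict.getD PySem.Dict.get?
  simp only [any_map_sortF, hfind]
  by_cases hc : d.items.any (fun p => p.1 == k)
  · simp only [hc, if_true]
    cases hf : List.find? (fun p => p.1 == k) d.items with
    | none =>
      exfalso
      rw [List.any_eq_true] at hc
      obtain ⟨p, hp, hpk⟩ := hc
      have := List.find?_eq_none.mp hf p hp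
      simp_all
    | some p =>
      simp only [Option.map_some, Option.getD_some]
      rw [← sortedDesc_append, update_map_sortF]
  · simp only [hc]
    cases hf : List.find? (fun p => p.1 == k) d.items with
    | none =>
      have h1 : PySem.List.sorted [ts] (fun x : String => x) true = [ts] := rfl
      have h2 : insertDescB ts [] = [ts] := rfl
      simp [h1, h2]
    | some p =>
      exfalso
      have := List.find?_some hf
      have hm := List.mem_of_find?_eq_some hf
      rw [List.any_eq_true] at hc
      exact hc ⟨p, hm, this⟩

-- main loop correspondence: A's skip-loop followed by value-sorting equals B's
-- filter/map/filter pipeline folded with descending insertions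
lemma fold_rel (ti oi : Nat) (skip : String → Bool) (rest : List (List String))
    (dA : PySem.Dict String (List String)) :
    PySem.Dict.mk ((rest.foldl (fun d row =>
        if row.length ≤ max ti oi then d
        else
          if skip (PySem.List.pyGetD row (ti : Int) "") then d
          else PySem.Dict.modify d (PySem.List.pyGetD row (oi : Int) "") []
                 (fun l => l ++ [PySem.List.pyGetD row (ti : Int) ""])) dA).items.map
        (fun p => (p.1, PySem.List.sorted p.2 (fun x => x) true)))
      = ((((rest.filter (fun row => decide (max ti oi < row.length))).map
            (fun row => (PySem.List.pyGetD row (oi : Int) "", PySem.List.pyGetD row (ti : Int) ""))).filter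
            (fun p => !skip p.2)).foldl
          (fun d p => PySem.Dict.modify d p.1 [] (fun l => insertDescB p.2 l))
          (PySem.Dict.mk (dA.items.map (fun p => (p.1, PySem.List.sorted p.2 (fun x => x) true))))) := by
  induction rest generalizing dA with
  | nil => rfl
  | cons row rest ih =>
    by_cases hlen : row.length ≤ max ti oi
    · have hg : (decide (max ti oi < row.length)) = false := by simp [Nat.not_lt.mpr hlen]
      simp only [List.foldl_cons, if_pos hlen, List.filter_cons, hg, Bool.false_eq_true, if_false]
      exact ih dA
    · have hg : (decide (max ti oi < row.length)) = true := by simp [Nat.lt_of_not_le hlen]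
      by_cases hskip : skip (PySem.List.pyGetD row (ti : Int) "") = true
      · have hs : (!skip ((PySem.List.pyGetD row (oi : Int) "", PySem.List.pyGetD row (ti : Int) "") : String × String).2) = false := by
          show (!skip (PySem.List.pyGetD row (ti : Int) "")) = false
          rw [hskip]; rfl
        simp only [List.foldl_cons, if_neg hlen, if_pos hskip, List.filter_cons, hg, if_true,
          List.map_cons, hs, Bool.false_eq_true, if_false]
        exact ih dA
      · have hs : (!skip ((PySem.List.pyGetD row (oi : Int) "", PySem.List.pyGetD row (ti : Int) "") : String × String).2) = true := by
          show (!skip (PySem.List.pyGetD row (ti : Int) "")) = true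
          rw [Bool.eq_false_iff.mpr hskip]; rfl
        simp only [List.foldl_cons, if_neg hlen, if_neg hskip, List.filter_cons, hg, if_true,
          List.map_cons, hs]
        rw [ih, map_modify]

-- ===== VERDICT (by name: the statement is the Claim_ definition above) =====
theorem build_capture_map_spec : Claim_equal_build_capture_map := by
  intro rows cutoff _hdom hpre
  unfold Spec_build_capture_map
  match rows with
  | [] => rfl
  | header :: rest =>
    obtain ⟨hts, ho⟩ := hpre header (by simp)
    obtain ⟨ti, hti⟩ := Option.isSome_iff_exists.mp ((PySem.List.index?_isSome_iff header "timestamp").mpr hts)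
    obtain ⟨oi, hoi⟩ := Option.isSome_iff_exists.mp ((PySem.List.index?_isSome_iff header "original").mpr ho)
    show build_capture_map (header :: rest) cutoff = build_capture_map_alt (header :: rest) cutoff
    unfold build_capture_map build_capture_map_alt
    simp only [hti, hoi]
    cases cutoff with
    | none =>
      have := fold_rel ti oi (fun _ => false) rest PySem.Dict.empty
      simpa using congrArg PySem.Dict.items this
    | some c =>
      by_cases hc : c = ""
      · subst hc
        have := fold_rel ti oi (fun ts => !("" == "") && decide ("" ≤ ts)) rest PySem.Dict.empty
        simpa using congrArg PySem.Dict.items this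
      · have := fold_rel ti oi (fun ts => !(c == "") && decide (c ≤ ts)) rest PySem.Dict.empty
        have hfc : ∀ p : String × String,
            (!(!(c == "") && decide (c ≤ p.2))) = decide (p.2 < c) := by
          intro p
          have hce : (c == "") = false := beq_eq_false_iff_ne.mpr hc
          simp only [hce, Bool.not_false, Bool.true_and, ← decide_not, decide_eq_decide]
          exact not_le
        simp only [hfc] at this
        simpa [hc] using congrArg PySem.Dict.items this
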